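-- pv_equiv track=rewrite | github.com/SebastienLabbe/Sum-Equals-Product | second_attempt.py | gen_sol
-- ===== SOURCE A (Python) =====
-- def prod(a):
--     p = 1
--     for x in a:
--         p = p * x
--     return p
--
-- def gen_sol(k, attempt, result, n):
--
--     if len(attempt) == n:
--         if sum(attempt) == prod(attempt):
--             result.append(attempt)
--
--         return
--
--     else:
--         lower_bound = 1
--         if len(attempt) != 0:
--             lower_bound = attempt[-1]
--
--         for i in range(lower_bound, 2*k+1):
--             gen_sol(k+1, attempt + [i], result, n)
--
--     return result
-- ===== SOURCE B (Python) =====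
-- def prod(a):
--     p = 1
--     for x in a:
--         p = p * x
--     return p
--
-- def gen_sol(k, attempt, result, n):
--     # BFS: iteratively build each level of non-decreasing extensions (stopping early
--     # once no candidates remain), then filter with one sum==product pass.
--     m = len(attempt)
--     level = [attempt]
--     d = 0
--     while d < n - m and level:
--         bound = 2 * (k + d)
--         level = [a + [i] for a in level for i in range(a[-1] if a else 1, bound + 1)]
--         d += 1
--     for a in level:
--         if sum(a) == prod(a):
--             result.append(a)
--     return result
-- ===== Notes on version B (the rewrite author's own statement) =====
-- stated objective: alternative
-- what changed: A's recursive DFS that threads the result list through recursive calls is replaced by an iterative level-by-level (BFS) construction of all non-decreasing extensions, followed by a single sum==product filter pass.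
-- outside the precondition, e.g. on gen_sol(1, [2], [], 1): A returns None, B returns [[2]]
import Mathlib
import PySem

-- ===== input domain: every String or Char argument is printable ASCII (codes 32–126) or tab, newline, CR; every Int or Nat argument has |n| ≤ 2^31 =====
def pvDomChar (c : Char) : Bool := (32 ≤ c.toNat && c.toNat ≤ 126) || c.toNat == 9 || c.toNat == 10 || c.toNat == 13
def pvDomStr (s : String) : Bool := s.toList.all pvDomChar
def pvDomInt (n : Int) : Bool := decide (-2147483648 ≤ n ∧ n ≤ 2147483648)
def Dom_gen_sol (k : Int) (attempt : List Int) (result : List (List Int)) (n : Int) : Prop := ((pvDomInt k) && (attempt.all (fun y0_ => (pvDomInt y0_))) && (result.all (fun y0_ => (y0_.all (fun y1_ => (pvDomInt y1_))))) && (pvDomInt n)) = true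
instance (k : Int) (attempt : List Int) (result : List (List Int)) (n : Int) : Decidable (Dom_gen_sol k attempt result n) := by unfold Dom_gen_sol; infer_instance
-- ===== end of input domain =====

-- B replaces A's DFS recursion by an iterative level-by-level (BFS) construction plus one filter
-- pass (objective: alternative; same cost). Both A and B append the solutions to `result` in place,
-- in the same order; the equivalence proved is about the return value.

-- ===== PORT A =====
def pvProd (a : List Int) : Int := a.foldl (fun p x => p * x) 1

-- fuel is a pure totalization guard: gen_sol passes (n - len(attempt)).toNat + 1, which the
-- recursion (len grows by 1 per level) never exhausts; the 0-case is unreachable from gen_sol.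
def pvGenAux (fuel : Nat) (k : Int) (attempt : List Int) (result : List (List Int)) (n : Int) : List (List Int) :=
  match fuel with
  | 0 => result
  | fuel + 1 =>
    if (attempt.length : Int) = n then
      (if attempt.sum = pvProd attempt then result ++ [attempt] else result)
    else if (attempt.length : Int) < n then
      -- lower_bound = 1; if len(attempt) != 0: lower_bound = attempt[-1]  (getD never used: list nonempty)
      let lower_bound : Int := if attempt.length ≠ 0 then (PySem.List.pyGet? attempt (-1)).getD 1 else 1
      (PySem.List.pyRange lower_bound (2*k+1) 1).foldl
        (fun res i => pvGenAux fuel (k+1) (attempt ++ [i]) res n) result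
    else result   -- len(attempt) > n: the Python recurses forever (RecursionError); excluded by Pre_

def gen_sol (k : Int) (attempt : List Int) (result : List (List Int)) (n : Int) : List (List Int) :=
  pvGenAux ((n - attempt.length).toNat + 1) k attempt result n

-- ===== PORT B =====
-- steps counts the remaining iterations of the Python while-loop: d < n - m  ⇔  0 < steps
def pvBfsAux (steps : Nat) (k : Int) (d : Int) (level : List (List Int)) : List (List Int) :=
  match steps with
  | 0 => level
  | s + 1 =>
    if level.isEmpty then level
    else
      pvBfsAux s k (d+1)
        (level.flatMap (fun a =>
          (PySem.List.pyRange ((PySem.List.pyGet? a (-1)).getD 1) (2*(k+d)+1) 1).map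
            (fun i => a ++ [i])))

def gen_sol_alt (k : Int) (attempt : List Int) (result : List (List Int)) (n : Int) : List (List Int) :=
  let m : Int := attempt.length
  let level := pvBfsAux (n - m).toNat k 0 [attempt]
  level.foldl (fun res a => if a.sum = pvProd a then res ++ [a] else res) result

-- ===== PRECONDITION & SPEC =====
-- Pre_ excludes inputs with len(attempt) >= n: there A either returns None instead of a list
-- (len(attempt) == n) or recurses forever until RecursionError (len(attempt) > n).
def Pre_gen_sol (k : Int) (attempt : List Int) (result : List (List Int)) (n : Int) : Prop :=
  (attempt.length : Int) < n
instance (k : Int) (attempt : List Int) (result : List (List Int)) (n : Int) : Decidable (Pre_gen_sol k attempt result n) := by unfold Pre_gen_sol; infer_instance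

def pvWitness_gen_sol : Int × List Int × List (List Int) × Int := (1, [], [], 2)

def Spec_gen_sol (k : Int) (attempt : List Int) (result : List (List Int)) (n : Int) (out : List (List Int)) : Prop := out = gen_sol_alt k attempt result n
instance (k : Int) (attempt : List Int) (result : List (List Int)) (n : Int) (out : List (List Int)) : Decidable (Spec_gen_sol k attempt result n out) := by unfold Spec_gen_sol; infer_instance

-- ===== CLAIM (what is proved, stated in full; the proofs are below) =====
def Claim_equal_gen_sol : Prop := ∀ (k : Int) (attempt : List Int) (result : List (List Int)) (n : Int), Dom_gen_sol k attempt result n → Pre_gen_sol k attempt result n → Spec_gen_sol k attempt result n (gen_sol k attempt result n)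

-- ===== LEMMAS AND PROOFS =====

-- the one-step extension used by both sides, and the BFS levels as a pure fuel recursion
def pvExt (k : Int) (a : List Int) : List (List Int) :=
  (PySem.List.pyRange ((PySem.List.pyGet? a (-1)).getD 1) (2*k+1) 1).map (fun i => a ++ [i])

def pvLevels : Nat → Int → List (List Int) → List (List Int)
  | 0, _, L => L
  | m+1, k, L => pvLevels m (k+1) (L.flatMap (pvExt k))

def pvFilt (L : List (List Int)) : List (List Int) := L.filter (fun a => a.sum == pvProd a)

lemma pvFiltFold (L : List (List Int)) (res : List (List Int)) :
    L.foldl (fun res a => if a.sum = pvProd a then res ++ [a] else res) res = res ++ pvFilt L := by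
  induction L generalizing res with
  | nil => simp [pvFilt]
  | cons a L ih =>
    simp only [List.foldl_cons, ih, pvFilt, List.filter_cons]
    by_cases h : a.sum = pvProd a <;> simp [h]

lemma pvLevels_append (m : Nat) (k : Int) (L1 L2 : List (List Int)) :
    pvLevels m k (L1 ++ L2) = pvLevels m k L1 ++ pvLevels m k L2 := by
  induction m generalizing k L1 L2 with
  | zero => simp [pvLevels]
  | succ m ih => simp [pvLevels, List.flatMap_append, ih]

lemma pvLevels_nil (m : Nat) (k : Int) : pvLevels m k [] = [] := by
  induction m generalizing k with
  | zero => rfl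
  | succ m ih => simp [pvLevels, ih]

lemma pvLevels_map (m : Nat) (k : Int) (xs : List Int) (f : Int → List Int) :
    pvLevels m k (xs.map f) = xs.flatMap (fun x => pvLevels m k [f x]) := by
  induction xs with
  | nil => simp [pvLevels_nil]
  | cons x xs ih =>
    have h : (x :: xs).map f = [f x] ++ xs.map f := rfl
    rw [h, pvLevels_append, ih, List.flatMap_cons]

lemma pvFilt_flatMap (xs : List Int) (g : Int → List (List Int)) :
    pvFilt (xs.flatMap g) = xs.flatMap (fun x => pvFilt (g x)) := by
  induction xs with
  | nil => rfl
  | cons x xs ih =>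
    simp only [List.flatMap_cons, pvFilt, List.filter_append] at *
    rw [ih]

lemma pvBfs_levels (M : Nat) : ∀ (d : Int) (k : Int) (L : List (List Int)),
    pvBfsAux M k d L = pvLevels M (k+d) L := by
  induction M with
  | zero => intro d k L; rfl
  | succ M ih =>
    intro d k L
    simp only [pvBfsAux]
    by_cases hL : L.isEmpty
    · rw [if_pos hL, List.isEmpty_iff.mp hL, pvLevels_nil]
    · rw [if_neg hL, ih (d+1) k]
      have h2 : k + (d+1) = (k+d) + 1 := by ring
      rw [h2]
      rfl

lemma pvLb (a : List Int) :
    (if a.length ≠ 0 then (PySem.List.pyGet? a (-1)).getD 1 else 1)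
      = (PySem.List.pyGet? a (-1)).getD 1 := by
  match a with
  | [] => simp [PySem.List.pyGet?, PySem.List.pyIdx?]
  | x :: xs => simp

lemma pvMain (fuel : Nat) : ∀ (k : Int) (a : List Int) (res : List (List Int)) (n : Int),
    (a.length : Int) ≤ n → (n - a.length).toNat < fuel →
    pvGenAux fuel k a res n = res ++ pvFilt (pvLevels (n - a.length).toNat k [a]) := by
  induction fuel with
  | zero => intro k a res n _ h2; omega
  | succ f ih =>
    intro k a res n h1 h2
    by_cases hEq : (a.length : Int) = n
    · have hM : (n - (a.length : Int)).toNat = 0 := by omega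
      simp only [pvGenAux, if_pos hEq, hM]
      show _ = res ++ pvFilt [a]
      simp only [pvFilt, List.filter_cons, List.filter_nil]
      by_cases h : a.sum = pvProd a <;> simp [h]
    · have hLt : (a.length : Int) < n := lt_of_le_of_ne h1 hEq
      simp only [pvGenAux, if_neg hEq, if_pos hLt, pvLb]
      have loop : ∀ (l : List Int) (res : List (List Int)),
          l.foldl (fun res i => pvGenAux f (k+1) (a ++ [i]) res n) res
            = res ++ l.flatMap (fun i =>
                pvFilt (pvLevels (n - ((a.length : Int) + 1)).toNat (k+1) [a ++ [i]])) := by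
        intro l
        induction l with
        | nil => intro res; simp
        | cons i rest ihl =>
          intro res
          rw [List.foldl_cons, ih (k+1) (a ++ [i]) res n (by simp; omega) (by simp; omega), ihl]
          simp [List.flatMap_cons, List.append_assoc, List.length_append]
      rw [loop]
      have hM : (n - (a.length : Int)).toNat = (n - ((a.length : Int) + 1)).toNat + 1 := by omega
      rw [hM]
      show _ = res ++ pvFilt (pvLevels _ (k+1) ([a].flatMap (pvExt k)))
      have hsing : [a].flatMap (pvExt k) = pvExt k a := by simp
      rw [hsing]
      unfold pvExt
      rw [pvLevels_map, pvFilt_flatMap]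

lemma pvAlt (k : Int) (a : List Int) (res : List (List Int)) (n : Int) :
    gen_sol_alt k a res n = res ++ pvFilt (pvLevels (n - a.length).toNat k [a]) := by
  show (pvBfsAux (n - (a.length : Int)).toNat k 0 [a]).foldl
      (fun res a => if a.sum = pvProd a then res ++ [a] else res) res = _
  rw [pvBfs_levels, add_zero, pvFiltFold]

-- ===== VERDICT (by name: the statement is the Claim_ definition above) =====
theorem gen_sol_spec : Claim_equal_gen_sol := by
  intro k attempt result n _ hPre
  have h1 : (attempt.length : Int) ≤ n := le_of_lt hPre
  show gen_sol k attempt result n = gen_sol_alt k attempt result n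
  rw [gen_sol, pvMain ((n - attempt.length).toNat + 1) k attempt result n h1 (by omega),
      pvAlt k attempt result n]
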